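-- pv_equiv track=rewrite | github.com/Ajayj2024/Ad-Layout-Generation | src/ad_data_preprocessing/data_preprocessing2json.py | map_label2coord
-- ===== SOURCE A (Python) =====
-- from collections import defaultdict
--
-- def map_label2coord(labels_pos_lst):
--   labels2coord = defaultdict(list)
--   for lab in labels_pos_lst:
--     space_count = 0
--     for i in range(-1,-len(lab)-1, -1):
--       if lab[i] == " ":
--         space_count += 1
--
--       if space_count == 4:
--         split_idx = len(lab) + i
--         # mapping label with coordinate points
--         labels2coord[lab[:split_idx]].append([int(val) for val in lab[split_idx+1:].split(" ")])
--         break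
--
--   return labels2coord
-- ===== SOURCE B (Python) =====
-- from collections import defaultdict
--
-- def map_label2coord(labels_pos_lst):
--   labels2coord = defaultdict(list)
--   for lab in labels_pos_lst:
--     parts = lab.split(' ')
--     if len(parts) >= 5:
--       label = ' '.join(parts[:-4])
--       coords = [int(x) for x in parts[-4:]]
--       labels2coord[label].append(coords)
--   return labels2coord
-- ===== Notes on version B (the rewrite author's own statement) =====
-- stated objective: simpler
-- what changed: Replaced the backward character-by-character scan for the 4th-from-end space (with manual index arithmetic and slicing) by a single forward split(' ') plus list slicing: label = ' '.join(parts[:-4]), coords = parts[-4:].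
import Mathlib
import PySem

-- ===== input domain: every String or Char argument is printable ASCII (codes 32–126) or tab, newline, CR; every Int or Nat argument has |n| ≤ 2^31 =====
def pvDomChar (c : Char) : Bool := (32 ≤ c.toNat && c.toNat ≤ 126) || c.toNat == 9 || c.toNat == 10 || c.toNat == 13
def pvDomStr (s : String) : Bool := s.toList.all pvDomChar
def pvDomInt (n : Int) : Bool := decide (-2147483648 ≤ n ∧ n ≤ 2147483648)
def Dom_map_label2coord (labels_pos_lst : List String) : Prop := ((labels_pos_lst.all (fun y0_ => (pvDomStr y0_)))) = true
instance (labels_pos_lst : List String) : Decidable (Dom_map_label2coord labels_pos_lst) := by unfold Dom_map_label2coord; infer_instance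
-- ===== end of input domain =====

-- B replaces A's backward character scan for the 4th-from-end space by one forward split(' ')
-- plus slicing: a simpler decomposition (same asymptotic cost; a timing run measured B faster
-- by a constant factor). Equivalence of the RETURN value is proved on Pre_ (inputs where the four
-- coordinate tokens parse as ints; elsewhere Python A raises ValueError).

-- ===== PORT A =====
-- inner 'for i in range(-1,-len(lab)-1,-1)' loop of A: structural recursion over the index list;
-- 'int(val)' is ported as (PySem.Int.ofChars? val).getD 0 — exact where int() succeeds, which
-- Pre_map_label2coord guarantees (Python raises ValueError outside it).
def mapLab2coordLoopA (lab : String) (idxs : List Int) (space_count : Nat)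
    (d : PySem.Dict String (List (List Int))) : PySem.Dict String (List (List Int)) :=
  match idxs with
  | [] => d
  | i :: rest =>
    let sc := if PySem.Str.pyGet? lab i = some ' ' then space_count + 1 else space_count
    if sc = 4 then
      let split_idx : Int := PySem.Str.len lab + i
      -- labels2coord[lab[:split_idx]].append([int(val) for val in lab[split_idx+1:].split(" ")])
      PySem.Dict.modify d (PySem.Str.slice lab none (some split_idx)) []
        (· ++ [(PySem.Chars.splitOn (PySem.Str.slice lab (some (split_idx + 1)) none).toList [' ']).map
                 (fun val => (PySem.Int.ofChars? val).getD 0)])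
    else mapLab2coordLoopA lab rest sc d

def map_label2coord (labels_pos_lst : List String) : List (String × List (List Int)) :=
  (labels_pos_lst.foldl
    (fun d lab => mapLab2coordLoopA lab (PySem.List.pyRange (-1) (-(PySem.Str.len lab) - 1) (-1)) 0 d)
    PySem.Dict.empty).items

-- ===== PORT B =====
def map_label2coord_alt (labels_pos_lst : List String) : List (String × List (List Int)) :=
  (labels_pos_lst.foldl
    (fun d lab =>
      let parts : List String := (PySem.Chars.splitOn lab.toList [' ']).map String.ofList  -- lab.split(' ')
      if 5 ≤ parts.length then
        let label := PySem.Str.join " " (PySem.List.slice parts none (some (-4)))          -- ' '.join(parts[:-4])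
        let coords := (PySem.List.slice parts (some (-4)) none).map
                        (fun x => (PySem.Int.ofStr? x).getD 0)                             -- [int(x) for x in parts[-4:]]
        PySem.Dict.modify d label [] (· ++ [coords])
      else d)
    PySem.Dict.empty).items

-- ===== PRECONDITION & SPEC =====
-- Pre_ excludes exactly the inputs where Python A raises ValueError: a string with at least four
-- spaces whose last four space-separated tokens do not all parse with int().
def Pre_map_label2coord (labels_pos_lst : List String) : Prop :=
  ∀ lab ∈ labels_pos_lst,
    5 ≤ (PySem.Chars.splitOn lab.toList [' ']).length →
    ∀ t ∈ (PySem.Chars.splitOn lab.toList [' ']).drop ((PySem.Chars.splitOn lab.toList [' ']).length - 4),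
      (PySem.Int.ofChars? t).isSome = true
instance (labels_pos_lst : List String) : Decidable (Pre_map_label2coord labels_pos_lst) := by
  unfold Pre_map_label2coord; infer_instance

def pvWitness_map_label2coord : List String := ["cat 1 2 3 4", "a b -20 30 40 50"]

def Spec_map_label2coord (labels_pos_lst : List String) (out : List (String × List (List Int))) : Prop := out = map_label2coord_alt labels_pos_lst
instance (labels_pos_lst : List String) (out : List (String × List (List Int))) : Decidable (Spec_map_label2coord labels_pos_lst out) := by unfold Spec_map_label2coord; infer_instance

-- ===== CLAIM (what is proved, stated in full; the proofs are below) =====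
def Claim_equal_map_label2coord : Prop := ∀ (labels_pos_lst : List String), Dom_map_label2coord labels_pos_lst → Pre_map_label2coord labels_pos_lst → Spec_map_label2coord labels_pos_lst (map_label2coord labels_pos_lst)

-- ===== LEMMAS AND PROOFS =====

-- naive single-character split (proof-side model of PySem.Chars.splitOn · [' '])
def pvSp : List Char → List (List Char)
  | [] => [[]]
  | a :: rest => if a = ' ' then [] :: pvSp rest else (pvSp rest).modifyHead (a :: ·)

-- proof-side model of A's backward scan: rs is the reversed scanned part; returns the
-- split index (position from the start) where the running space count reaches 4.
def pvRf : List Char → Nat → Option Nat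
  | [], _ => none
  | c :: rest, sc =>
    let sc' := if c = ' ' then sc + 1 else sc
    if sc' = 4 then some rest.length else pvRf rest sc'

theorem pvSp_ne_nil (l : List Char) : pvSp l ≠ [] := by
  cases l with
  | nil => simp [pvSp]
  | cons a rest =>
    simp only [pvSp]
    split_ifs
    · simp
    · exact fun h => pvSp_ne_nil rest (by simpa using congrArg List.length h)

theorem pvSp_length (l : List Char) : (pvSp l).length = l.count ' ' + 1 := by
  induction l with
  | nil => simp [pvSp]
  | cons a rest ih =>
    by_cases h : a = ' ' <;> simp [pvSp, h, ih]

theorem pvSp_append (pre suf : List Char) :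
    pvSp (pre ++ ' ' :: suf) = pvSp pre ++ pvSp suf := by
  induction pre with
  | nil => simp [pvSp]
  | cons a rest ih =>
    by_cases h : a = ' '
    · simp [pvSp, h, ih]
    · simp only [List.cons_append, pvSp, h, if_false, ih]
      cases hsp : pvSp rest with
      | nil => exact absurd hsp (pvSp_ne_nil rest)
      | cons x xs => simp

theorem pvSp_join (l : List Char) : PySem.Chars.join [' '] (pvSp l) = l := by
  induction l with
  | nil => simp [pvSp, PySem.Chars.join, List.intercalate]
  | cons a rest ih =>
    by_cases h : a = ' '
    · cases hsp : pvSp rest with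
      | nil => exact absurd hsp (pvSp_ne_nil rest)
      | cons x xs =>
        simp only [pvSp, h, if_true, hsp] at ih ⊢
        simp [PySem.Chars.join, List.intercalate] at ih ⊢
        simpa using ih
    · cases hsp : pvSp rest with
      | nil => exact absurd hsp (pvSp_ne_nil rest)
      | cons x xs =>
        simp only [pvSp, h, if_false, hsp, List.modifyHead] at ih ⊢
        cases xs with
        | nil => simp [PySem.Chars.join, List.intercalate] at ih ⊢; simp [ih]
        | cons y ys =>
          simp [PySem.Chars.join, List.intercalate] at ih ⊢
          simpa [h] using ih

theorem pvGo (fuel : Nat) : ∀ (l cur : List Char) (acc : List (List Char)), l.length ≤ fuel →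
    PySem.Chars.splitOn.go [' '] fuel l cur acc
      = acc.reverse ++ (pvSp l).modifyHead (cur.reverse ++ ·) := by
  induction fuel with
  | zero =>
    intro l cur acc h
    have : l = [] := List.eq_nil_of_length_eq_zero (Nat.le_zero.mp h)
    subst this
    simp [PySem.Chars.splitOn.go, pvSp]
  | succ fuel ih =>
    intro l cur acc h
    cases l with
    | nil => simp [PySem.Chars.splitOn.go, pvSp]
    | cons c rest =>
      rw [PySem.Chars.splitOn.go]
      by_cases hc : c = ' '
      · rw [if_pos (by simp [List.isPrefixOf, hc])]
        rw [ih _ _ _ (by simpa using Nat.le_of_succ_le_succ h)]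
        cases hsp : pvSp rest with
        | nil => exact absurd hsp (pvSp_ne_nil rest)
        | cons x xs => simp [pvSp, hc, hsp]
      · rw [if_neg (by simp [List.isPrefixOf]; exact fun hh => hc hh.symm)]
        rw [ih _ _ _ (by simpa using Nat.le_of_succ_le_succ h)]
        cases hsp : pvSp rest with
        | nil => exact absurd hsp (pvSp_ne_nil rest)
        | cons x xs => simp [pvSp, hc, hsp]

theorem pvSplitOn_eq_pvSp (l : List Char) : PySem.Chars.splitOn l [' '] = pvSp l := by
  rw [PySem.Chars.splitOn, pvGo (l.length + 1) l [] [] (by omega)]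
  cases hsp : pvSp l with
  | nil => exact absurd hsp (pvSp_ne_nil l)
  | cons x xs => simp

theorem pvRf_none (l : List Char) : ∀ (sc : Nat), l.count ' ' + sc < 4 →
    pvRf l.reverse sc = none := by
  induction l using List.reverseRecOn with
  | nil => intro sc _; simp [pvRf]
  | append_singleton l a ih =>
    intro sc h
    rw [List.reverse_append]
    simp only [List.reverse_singleton, List.singleton_append, pvRf]
    have hcnt : (l ++ [a]).count ' ' = l.count ' ' + (if a = ' ' then 1 else 0) := by
      by_cases ha : a = ' ' <;> simp [List.count_append, ha]
    rw [hcnt] at h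
    by_cases ha : a = ' '
    · simp only [ha, if_true] at h ⊢
      rw [if_neg (by omega)]
      exact ih (sc + 1) (by omega)
    · simp only [ha, if_false] at h ⊢
      rw [if_neg (by omega)]
      exact ih sc (by omega)

theorem pvRf_found (l : List Char) : ∀ (sc : Nat), sc ≤ 3 → 4 ≤ sc + l.count ' ' →
    ∃ pre suf, l = pre ++ ' ' :: suf ∧ suf.count ' ' = 3 - sc ∧
      pvRf l.reverse sc = some pre.length := by
  induction l using List.reverseRecOn with
  | nil => intro sc hsc h; simp at h; omega
  | append_singleton l a ih =>
    intro sc hsc h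
    have hcnt : (l ++ [a]).count ' ' = l.count ' ' + (if a = ' ' then 1 else 0) := by
      by_cases ha : a = ' ' <;> simp [List.count_append, ha]
    rw [List.reverse_append]
    simp only [List.reverse_singleton, List.singleton_append, pvRf]
    by_cases ha : a = ' '
    · by_cases h3 : sc = 3
      · refine ⟨l, [], by simp [ha], by simp [h3], ?_⟩
        simp [ha, h3, List.length_reverse]
      · have hsc' : sc + 1 ≤ 3 := by omega
        have h4 : 4 ≤ (sc + 1) + l.count ' ' := by rw [hcnt] at h; simp [ha] at h; omega
        obtain ⟨pre, suf, hl, hc, hr⟩ := ih (sc + 1) hsc' h4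
        refine ⟨pre, suf ++ [a], by simp [hl], ?_, ?_⟩
        · rw [List.count_append]; simp [ha]; omega
        · simp only [ha, if_true]
          rw [if_neg (by omega)]
          exact hr
    · have h4 : 4 ≤ sc + l.count ' ' := by rw [hcnt] at h; simp [ha] at h; omega
      obtain ⟨pre, suf, hl, hc, hr⟩ := ih sc hsc h4
      refine ⟨pre, suf ++ [a], by simp [hl], ?_, ?_⟩
      · rw [List.count_append]; simp [ha]; omega
      · simp only [ha, if_false]
        rw [if_neg (by omega)]
        exact hr

def pvIdx (t : Nat) : Int := -1 - t

theorem pvPyRangeNeg (n : Nat) :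
    PySem.List.pyRange (-1) (-(n:Int)-1) (-1) = (List.range n).map pvIdx := by
  rcases Nat.eq_zero_or_pos n with h | h
  · subst h; simp [PySem.List.pyRange]
  · simp only [PySem.List.pyRange]
    rw [if_neg (by norm_num), if_neg (by norm_num), if_pos (by omega)]
    have h2 : (-1 - (-(n:Int) - 1) + - -1 - 1) / - -1 = (n : Int) := by ring_nf; simp
    rw [h2]
    simp only [Int.toNat_natCast]
    refine List.map_congr_left (fun k _ => ?_)
    simp [pvIdx]; ring

theorem pvPyGetNeg (xs : List Char) (m : Nat) (h : m < xs.length) :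
    PySem.List.pyGet? xs ((m:Int) - xs.length) = xs[m]? := by
  simp only [PySem.List.pyGet?, PySem.List.pyIdx?]
  rw [if_neg (by omega), if_pos (by omega)]
  simp only [Option.bind]
  congr 1; omega

theorem pvALoop_eq (lab : String) : ∀ (m : Nat) (sc : Nat) (d : PySem.Dict String (List (List Int))),
    m ≤ lab.toList.length → sc ≤ 3 →
    mapLab2coordLoopA lab ((List.range' (lab.toList.length - m) m).map pvIdx) sc d
    = match pvRf ((lab.toList.take m).reverse) sc with
      | none => d
      | some j => PySem.Dict.modify d (PySem.Str.slice lab none (some (j:Int))) []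
          (· ++ [(PySem.Chars.splitOn (PySem.Str.slice lab (some ((j:Int) + 1)) none).toList [' ']).map
                   (fun val => (PySem.Int.ofChars? val).getD 0)]) := by
  intro m
  induction m with
  | zero => intro sc d _ _; simp [mapLab2coordLoopA, pvRf]
  | succ m ih =>
    intro sc d hm hsc
    have hmn : m < lab.toList.length := by omega
    have hr : List.range' (lab.toList.length - (m+1)) (m+1) 1
        = (lab.toList.length - (m+1)) :: List.range' (lab.toList.length - m) m 1 := by
      have h1 : lab.toList.length - (m+1) + 1 = lab.toList.length - m := by omega
      rw [List.range'_succ, h1]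
    have hidx : pvIdx (lab.toList.length - (m+1)) = (m:Int) - lab.toList.length := by
      simp only [pvIdx]; push_cast [Nat.cast_sub (by omega : m+1 ≤ lab.toList.length)]; ring
    have hget : PySem.Str.pyGet? lab ((m:Int) - lab.toList.length) = some lab.toList[m] := by
      show PySem.List.pyGet? lab.toList ((m:Int) - lab.toList.length) = some lab.toList[m]
      rw [pvPyGetNeg _ _ hmn, List.getElem?_eq_getElem hmn]
    have htake : (lab.toList.take (m+1)).reverse = lab.toList[m] :: (lab.toList.take m).reverse := by
      rw [List.take_add_one, List.getElem?_eq_getElem hmn]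
      simp
    rw [hr, List.map_cons, hidx, mapLab2coordLoopA, hget, htake]
    simp only [pvRf, Option.some.injEq]
    by_cases hsp : lab.toList[m] = ' '
    · simp only [hsp, if_true]
      by_cases h4 : sc + 1 = 4
      · rw [if_pos h4, if_pos h4]
        have hsi : PySem.Str.len lab + ((m:Int) - lab.toList.length) = (m:Int) := by
          simp only [PySem.Str.len]; ring
        rw [hsi]
        have hlen : (lab.toList.take m).reverse.length = m := by
          simp only [List.length_reverse, List.length_take]; omega
        rw [hlen]
      · rw [if_neg h4, if_neg h4]
        exact ih (sc+1) d (by omega) (by omega)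
    · simp only [hsp, if_false]
      by_cases h4 : sc = 4
      · omega
      · rw [if_neg h4, if_neg h4]
        exact ih sc d (by omega) hsc

theorem pvStep_eq (d : PySem.Dict String (List (List Int))) (lab : String) :
    mapLab2coordLoopA lab (PySem.List.pyRange (-1) (-(PySem.Str.len lab) - 1) (-1)) 0 d
    = (let parts : List String := (PySem.Chars.splitOn lab.toList [' ']).map String.ofList
       if 5 ≤ parts.length then
         let label := PySem.Str.join " " (PySem.List.slice parts none (some (-4)))
         let coords := (PySem.List.slice parts (some (-4)) none).map
                         (fun x => (PySem.Int.ofStr? x).getD 0)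
         PySem.Dict.modify d label [] (· ++ [coords])
       else d) := by
  have hlen : PySem.Str.len lab = ((lab.toList.length : Nat) : Int) := rfl
  rw [hlen, pvPyRangeNeg, List.range_eq_range',
      show List.range' 0 lab.toList.length = List.range' (lab.toList.length - lab.toList.length) lab.toList.length by rw [Nat.sub_self],
      pvALoop_eq lab lab.toList.length 0 d le_rfl (by omega), List.take_length]
  simp only [pvSplitOn_eq_pvSp, List.length_map]
  by_cases hc : lab.toList.count ' ' < 4
  · rw [pvRf_none _ 0 (by omega)]
    rw [if_neg (by rw [pvSp_length]; omega)]
  · obtain ⟨pre, suf, hl, hcs, hr⟩ := pvRf_found lab.toList 0 (by omega) (by omega)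
    rw [hr]
    simp only []
    simp only [Nat.sub_zero] at hcs
    have hl2 : (pvSp suf).length = 4 := by rw [pvSp_length, hcs]
    have hkeyA : PySem.Str.slice lab none (some (pre.length : Int)) = String.ofList pre := by
      show String.ofList (PySem.Chars.slice lab.toList none (some (pre.length : Int))) = String.ofList pre
      rw [PySem.Chars.slice_eq_listSlice, PySem.List.slice_to_natCast, hl, List.take_left]
    have htail : (PySem.Str.slice lab (some ((pre.length : Int) + 1)) none).toList = suf := by
      show (String.ofList (PySem.Chars.slice lab.toList (some ((pre.length : Int) + 1)) none)).toList = suf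
      rw [String.toList_ofList, PySem.Chars.slice_eq_listSlice,
          show ((pre.length : Int) + 1) = ((pre.length + 1 : Nat) : Int) by push_cast; ring,
          PySem.List.slice_from_natCast, hl,
          show pre ++ ' ' :: suf = (pre ++ [' ']) ++ suf by simp,
          List.drop_left' (by simp)]
    rw [hkeyA, htail, hl, pvSp_append, List.map_append]
    have hlens : ((pvSp pre).map String.ofList ++ (pvSp suf).map String.ofList).length
        = (pvSp pre).length + 4 := by simp [hl2]
    rw [if_pos (by simp only [List.length_append, pvSp_length, hcs]; omega)]
    have htk : PySem.List.slice ((pvSp pre).map String.ofList ++ (pvSp suf).map String.ofList)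
        none (some (-4)) = (pvSp pre).map String.ofList := by
      rw [PySem.List.slice_to_neg_ofNat _ 4 (by norm_num), hlens,
          show (pvSp pre).length + 4 - 4 = ((pvSp pre).map String.ofList).length by simp,
          List.take_left]
    have hdr : PySem.List.slice ((pvSp pre).map String.ofList ++ (pvSp suf).map String.ofList)
        (some (-4)) none = (pvSp suf).map String.ofList := by
      rw [PySem.List.slice_from_neg_ofNat _ 4 (by norm_num), hlens,
          show (pvSp pre).length + 4 - 4 = ((pvSp pre).map String.ofList).length by simp,
          List.drop_left]
    rw [htk, hdr]
    have hjoin : PySem.Str.join " " ((pvSp pre).map String.ofList) = String.ofList pre := by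
      show String.ofList (PySem.Chars.join " ".toList (((pvSp pre).map String.ofList).map String.toList)) = String.ofList pre
      rw [show " ".toList = [' '] from rfl, List.map_map,
          show String.toList ∘ String.ofList = id from funext (fun l => String.toList_ofList),
          List.map_id, pvSp_join]
    rw [hjoin, List.map_map]
    have hmap : List.map ((fun x => (PySem.Int.ofStr? x).getD 0) ∘ String.ofList) (pvSp suf)
        = List.map (fun val => (PySem.Int.ofChars? val).getD 0) (pvSp suf) := by
      refine List.map_congr_left (fun v _ => ?_)
      show (PySem.Int.ofStr? (String.ofList v)).getD 0 = (PySem.Int.ofChars? v).getD 0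
      rw [show PySem.Int.ofStr? (String.ofList v) = PySem.Int.ofChars? (String.ofList v).toList from rfl,
          String.toList_ofList]
    rw [hmap]

theorem pvFoldl_eq (ls : List String) (d : PySem.Dict String (List (List Int))) :
    ls.foldl (fun d lab =>
        mapLab2coordLoopA lab (PySem.List.pyRange (-1) (-(PySem.Str.len lab) - 1) (-1)) 0 d) d
    = ls.foldl (fun d lab =>
        let parts : List String := (PySem.Chars.splitOn lab.toList [' ']).map String.ofList
        if 5 ≤ parts.length then
          let label := PySem.Str.join " " (PySem.List.slice parts none (some (-4)))
          let coords := (PySem.List.slice parts (some (-4)) none).map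
                          (fun x => (PySem.Int.ofStr? x).getD 0)
          PySem.Dict.modify d label [] (· ++ [coords])
        else d) d := by
  induction ls generalizing d with
  | nil => rfl
  | cons lab rest ih => simp only [List.foldl_cons, pvStep_eq]

-- ===== VERDICT (by name: the statement is the Claim_ definition above) =====
theorem map_label2coord_spec : Claim_equal_map_label2coord := by
  intro labels _ _
  unfold Spec_map_label2coord map_label2coord map_label2coord_alt
  rw [pvFoldl_eq]
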